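-- pv_equiv track=rewrite | github.com/PedroVenanci0/Projetos-do-IFPI | ALGORITMOS-IFPI/BEECROWD/1024.py | terceiro_passo
-- ===== SOURCE A (Python) =====
-- def terceiro_passo(texto_invertido):
--
--     meio_da_string_truncado = len(texto_invertido) // 2
--     texto_codificado = ""
--
--     for elements in range(len(texto_invertido)):
--
--         texto_invertido[elements]
--
--         if elements >= meio_da_string_truncado:
--             texto_codificado += chr(ord(texto_invertido[elements]) - 1)
--
--         else:
--             texto_codificado += texto_invertido[elements]
--
--     return texto_codificado
-- ===== SOURCE B (Python) =====
-- def terceiro_passo(texto_invertido):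
--     mid = len(texto_invertido) // 2
--     head = ''.join(texto_invertido[:mid])
--     tail = ''.join(chr(ord(c) - 1) for c in texto_invertido[mid:])
--     return head + tail
-- ===== Notes on version B (the rewrite author's own statement) =====
-- stated objective: simpler
-- what changed: Replaces the single indexed loop with a per-element branch by a split at mid into two uniform passes: the head joined verbatim and the tail joined with each code decremented.
import Mathlib
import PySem

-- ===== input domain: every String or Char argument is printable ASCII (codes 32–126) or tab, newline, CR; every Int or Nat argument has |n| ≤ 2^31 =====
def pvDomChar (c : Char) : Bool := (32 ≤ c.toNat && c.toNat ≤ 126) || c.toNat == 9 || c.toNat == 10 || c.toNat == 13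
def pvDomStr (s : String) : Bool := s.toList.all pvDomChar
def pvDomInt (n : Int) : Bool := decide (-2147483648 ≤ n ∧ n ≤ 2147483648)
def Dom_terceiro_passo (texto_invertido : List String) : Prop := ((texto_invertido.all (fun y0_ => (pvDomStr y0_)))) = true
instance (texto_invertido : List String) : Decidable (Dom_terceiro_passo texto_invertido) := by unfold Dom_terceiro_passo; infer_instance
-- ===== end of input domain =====

-- B splits the list at mid into two uniform passes (head joined verbatim, tail joined decremented)
-- instead of A's single indexed loop with a per-element branch; objective: simpler.

-- ===== PORT A =====
-- chr(ord(s) - 1): exact for a one-character string whose char code is ≥ 1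
-- (ord raises on other strings; those inputs are excluded by Pre_ below, branch `_ => []` is unreachable there).
def pvDecA (s : String) : List Char :=
  match s.toList with
  | [c] => [Char.ofNat (c.toNat - 1)]
  | _ => []

-- the for-loop of A: index counter `i`, accumulator `tc` (texto_codificado as a char list)
def pvLoopA (meio : Nat) (i : Nat) (xs : List String) (tc : List Char) : List Char :=
  match xs with
  | [] => tc
  | s :: rest => pvLoopA meio (i + 1) rest (tc ++ (if i ≥ meio then pvDecA s else s.toList))

def terceiro_passo (texto_invertido : List String) : String :=
  let meio := texto_invertido.length / 2   -- len // 2, exact on Nat length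
  String.ofList (pvLoopA meio 0 texto_invertido [])

-- ===== PORT B =====
-- chr(ord(c) - 1) for a tail element (same exactness note as pvDecA)
def pvDecB (s : String) : List Char :=
  match s.toList with
  | [c] => [Char.ofNat (c.toNat - 1)]
  | _ => []

def terceiro_passo_alt (texto_invertido : List String) : String :=
  let mid := texto_invertido.length / 2
  String.ofList (((texto_invertido.take mid).map String.toList).flatten
             ++ ((texto_invertido.drop mid).map pvDecB).flatten)

-- ===== PRECONDITION & SPEC =====
-- Pre_ excludes exactly the inputs where A raises TypeError: an element at index ≥ len//2 that is
-- not a one-character string (ord() rejects it).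
def Pre_terceiro_passo (texto_invertido : List String) : Prop :=
  ((texto_invertido.drop (texto_invertido.length / 2)).all (fun s => s.toList.length == 1)) = true
instance (texto_invertido : List String) : Decidable (Pre_terceiro_passo texto_invertido) := by
  unfold Pre_terceiro_passo; infer_instance

def pvWitness_terceiro_passo : List String := ["ab", "x", "y"]

def Spec_terceiro_passo (texto_invertido : List String) (out : String) : Prop := out = terceiro_passo_alt texto_invertido
instance (texto_invertido : List String) (out : String) : Decidable (Spec_terceiro_passo texto_invertido out) := by unfold Spec_terceiro_passo; infer_instance

-- ===== CLAIM (what is proved, stated in full; the proofs are below) =====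
def Claim_equal_terceiro_passo : Prop := ∀ (texto_invertido : List String), Dom_terceiro_passo texto_invertido → Pre_terceiro_passo texto_invertido → Spec_terceiro_passo texto_invertido (terceiro_passo texto_invertido)

-- ===== LEMMAS AND PROOFS =====

theorem pvDec_eq (s : String) : pvDecA s = pvDecB s := rfl

theorem pvLoopA_eq (m : Nat) : ∀ (xs : List String) (i : Nat) (tc : List Char),
    pvLoopA m i xs tc
      = tc ++ ((xs.take (m - i)).map String.toList).flatten
           ++ ((xs.drop (m - i)).map pvDecA).flatten := by
  intro xs
  induction xs with
  | nil => intro i tc; simp [pvLoopA]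
  | cons s rest ih =>
    intro i tc
    by_cases h : i ≥ m
    · have h0 : m - i = 0 := by omega
      have h1 : m - (i + 1) = 0 := by omega
      simp [pvLoopA, h, h0, ih, h1]
    · have h0 : m - i = (m - (i + 1)) + 1 := by omega
      simp [pvLoopA, h, h0, ih]

theorem terceiro_passo_spec : Claim_equal_terceiro_passo := by
  intro xs _ _
  unfold Spec_terceiro_passo terceiro_passo terceiro_passo_alt
  simp only []
  have h := pvLoopA_eq (xs.length / 2) xs 0 []
  simp only [Nat.sub_zero, List.nil_append] at h
  rw [h]
  have : pvDecA = pvDecB := funext pvDec_eq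
  rw [this]
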